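-- pv_equiv track=rewrite | github.com/NilsvDoorn/eiwitten | eiwitten/version1/option.py | amino_positions
-- ===== SOURCE A (Python) =====
-- def amino_positions(option):
--     positions = []
--     x, y = 0, 5
--     positions.append(tuple((x, y + 1)))
--     positions.append(tuple((x, y)))
--     direction = "d"
--     for move in option:
--         if direction == "d":
--             if move == "right":
--                 x = x - 1
--                 direction = "l"
--             elif move == "left":
--                 x = x + 1
--                 direction = "r"
--             elif move == "forward":
--                 y = y - 1
--         elif direction == "r":
--             if move == "right":
--                 y = y - 1
--                 direction = "d"
--             elif move == "left":
--                 y = y + 1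
--                 direction = "u"
--             elif move == "forward":
--                 x = x + 1
--         elif direction == "l":
--             if move == "right":
--                 y = y + 1
--                 direction = "u"
--             elif move == "left":
--                 y = y - 1
--                 direction = "d"
--             elif move == "forward":
--                 x = x - 1
--         elif direction == "u":
--             if move == "right":
--                 x = x + 1
--                 direction = "r"
--             elif move == "left":
--                 x = x - 1
--                 direction = "l"
--             elif move == "forward":
--                 y = y + 1
--         positions.append(tuple((x, y)))
--     return positions
-- ===== SOURCE B (Python) =====
-- def amino_positions(option):
--     x, y = 0, 5
--     dx, dy = 0, -1
--     positions = [(x, y + 1), (x, y)]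
--     for move in option:
--         if move == "right":
--             dx, dy = dy, -dx
--             x, y = x + dx, y + dy
--         elif move == "left":
--             dx, dy = -dy, dx
--             x, y = x + dx, y + dy
--         elif move == "forward":
--             x, y = x + dx, y + dy
--         positions.append((x, y))
--     return positions
-- ===== Notes on version B (the rewrite author's own statement) =====
-- stated objective: simpler
-- what changed: Replaces the 4-state string direction with a heading vector (dx,dy) rotated by (dy,-dx)/(-dy,dx), collapsing A's 4x3 branch table into three uniform cases.
import Mathlib
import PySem

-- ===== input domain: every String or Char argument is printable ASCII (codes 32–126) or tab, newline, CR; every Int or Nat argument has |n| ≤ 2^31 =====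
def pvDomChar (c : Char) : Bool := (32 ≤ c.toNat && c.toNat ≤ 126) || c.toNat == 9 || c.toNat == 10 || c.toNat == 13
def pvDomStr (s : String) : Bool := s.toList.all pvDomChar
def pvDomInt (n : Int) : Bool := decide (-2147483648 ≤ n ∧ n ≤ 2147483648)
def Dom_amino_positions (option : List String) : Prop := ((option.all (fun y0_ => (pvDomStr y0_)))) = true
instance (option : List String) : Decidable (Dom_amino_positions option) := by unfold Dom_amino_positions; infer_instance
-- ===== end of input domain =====

-- B replaces A's 4-state string direction with a heading vector rotated by (dy,-dx)/(-dy,dx): simpler, same O(n).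


-- ===== PORT A =====
-- A's loop: state (x, y, direction-string), appending (x,y) after each move.
def aminoLoopA : List String → Int → Int → String → List (Int × Int)
  | [], _, _, _ => []
  | move :: rest, x, y, direction =>
    let s : Int × Int × String :=
      if direction = "d" then
        if move = "right" then (x - 1, y, "l")
        else if move = "left" then (x + 1, y, "r")
        else if move = "forward" then (x, y - 1, direction)
        else (x, y, direction)
      else if direction = "r" then
        if move = "right" then (x, y - 1, "d")
        else if move = "left" then (x, y + 1, "u")
        else if move = "forward" then (x + 1, y, direction)
        else (x, y, direction)
      else if direction = "l" then
        if move = "right" then (x, y + 1, "u")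
        else if move = "left" then (x, y - 1, "d")
        else if move = "forward" then (x - 1, y, direction)
        else (x, y, direction)
      else if direction = "u" then
        if move = "right" then (x + 1, y, "r")
        else if move = "left" then (x - 1, y, "l")
        else if move = "forward" then (x, y + 1, direction)
        else (x, y, direction)
      else (x, y, direction)
    (s.1, s.2.1) :: aminoLoopA rest s.1 s.2.1 s.2.2

def amino_positions (option : List String) : List (Int × Int) :=
  (0, 6) :: (0, 5) :: aminoLoopA option 0 5 "d"

-- ===== PORT B =====
-- B's loop: state (x, y, dx, dy); rotate the heading and step.
def aminoLoopB : List String → Int → Int → Int → Int → List (Int × Int)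
  | [], _, _, _, _ => []
  | move :: rest, x, y, dx, dy =>
    let s : Int × Int × Int × Int :=
      if move = "right" then (x + dy, y - dx, dy, -dx)
      else if move = "left" then (x - dy, y + dx, -dy, dx)
      else if move = "forward" then (x + dx, y + dy, dx, dy)
      else (x, y, dx, dy)
    (s.1, s.2.1) :: aminoLoopB rest s.1 s.2.1 s.2.2.1 s.2.2.2

def amino_positions_alt (option : List String) : List (Int × Int) :=
  (0, 6) :: (0, 5) :: aminoLoopB option 0 5 0 (-1)

-- ===== PRECONDITION & SPEC =====
def Spec_amino_positions (option : List String) (out : List (Int × Int)) : Prop := out = amino_positions_alt option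
instance (option : List String) (out : List (Int × Int)) : Decidable (Spec_amino_positions option out) := by unfold Spec_amino_positions; infer_instance

-- ===== CLAIM (what is proved, stated in full; the proofs are below) =====
def Claim_equal_amino_positions : Prop := ∀ (option : List String), Dom_amino_positions option → Spec_amino_positions option (amino_positions option)

-- ===== LEMMAS AND PROOFS =====
-- correspondence between A's string state and B's heading vector
def dirRel (d : String) (dx dy : Int) : Prop :=
  (d = "d" ∧ dx = 0 ∧ dy = -1) ∨ (d = "r" ∧ dx = 1 ∧ dy = 0) ∨
  (d = "l" ∧ dx = -1 ∧ dy = 0) ∨ (d = "u" ∧ dx = 0 ∧ dy = 1)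

theorem loop_eq (moves : List String) : ∀ (x y dx dy : Int) (d : String),
    dirRel d dx dy → aminoLoopA moves x y d = aminoLoopB moves x y dx dy := by
  induction moves with
  | nil => intro x y dx dy d _; rfl
  | cons m rest ih =>
    intro x y dx dy d hrel
    rcases hrel with ⟨hd, hx, hy⟩ | ⟨hd, hx, hy⟩ | ⟨hd, hx, hy⟩ | ⟨hd, hx, hy⟩ <;>
      subst hd hx hy <;>
      by_cases h1 : m = "right" <;> by_cases h2 : m = "left" <;> by_cases h3 : m = "forward" <;>
      simp_all [aminoLoopA, aminoLoopB] <;>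
      ((try refine ⟨by ring, ?_⟩); apply ih; unfold dirRel; norm_num)

-- ===== VERDICT (by name: the statement is the Claim_ definition above) =====
theorem amino_positions_spec : Claim_equal_amino_positions := by
  intro option _
  unfold Spec_amino_positions amino_positions amino_positions_alt
  rw [loop_eq option 0 5 0 (-1) "d" (by unfold dirRel; norm_num)]
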